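-- pv_equiv track=rewrite | github.com/hail-is/hail | hail/python/hail/plot2/utils.py | categorical_strings_to_colors
-- ===== SOURCE A (Python) =====
-- def categorical_strings_to_colors(string_set, discrete_color_scale):
--     color_dict = {}
--     x = 0
--
--     for element in string_set:
--         if element not in color_dict:
--             color_dict[element] = discrete_color_scale[x % len(discrete_color_scale)]
--             x += 1
--
--     return color_dict
-- ===== SOURCE B (Python) =====
-- def categorical_strings_to_colors(string_set, discrete_color_scale):
--     # Stateless per-element rule: an element gets a color exactly at its first
--     # occurrence (string_set.index(s) == i), and its color rank is the number of
--     # distinct strings strictly before it (len(set(string_set[:i]))).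
--     result = {}
--     for i, s in enumerate(string_set):
--         if string_set.index(s) == i:
--             rank = len(set(string_set[:i]))
--             result[s] = discrete_color_scale[rank % len(discrete_color_scale)]
--     return result
-- ===== Notes on version B (the rewrite author's own statement) =====
-- stated objective: alternative
-- what changed: B drops A's mutable counter/membership state: for each position it decides first-occurrence by string_set.index(s) == i and computes the color rank as len(set(string_set[:i])), the distinct-prefix count, so the assignment is a stateless per-element rule (nested scans) instead of an accumulator loop.
import Mathlib
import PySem

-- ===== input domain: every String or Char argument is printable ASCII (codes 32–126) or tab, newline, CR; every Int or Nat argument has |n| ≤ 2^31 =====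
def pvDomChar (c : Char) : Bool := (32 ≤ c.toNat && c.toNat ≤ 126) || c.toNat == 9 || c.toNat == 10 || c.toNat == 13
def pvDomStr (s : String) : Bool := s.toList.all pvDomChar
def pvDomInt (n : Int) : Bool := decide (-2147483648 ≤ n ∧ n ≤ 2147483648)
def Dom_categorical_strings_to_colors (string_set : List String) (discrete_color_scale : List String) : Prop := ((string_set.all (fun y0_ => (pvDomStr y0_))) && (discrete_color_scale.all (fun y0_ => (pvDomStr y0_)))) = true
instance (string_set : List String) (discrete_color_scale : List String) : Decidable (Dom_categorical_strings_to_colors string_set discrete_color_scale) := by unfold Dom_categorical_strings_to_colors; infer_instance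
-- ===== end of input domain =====

-- B replaces A's counter-and-membership accumulator loop by a stateless per-element rule (first-occurrence test via index(), rank via distinct-prefix count); alternative decomposition, same output. Return value only (both build a fresh dict).


-- ===== PORT A =====
-- Loop with a dict accumulator and an explicit counter x, exactly as A:
def categorical_strings_to_colors (string_set : List String) (discrete_color_scale : List String) : List (String × String) :=
  (string_set.foldl
    (fun (st : PySem.Dict String String × Int) element =>
      if st.1.contains element then st
      else (st.1.insert element
              ((PySem.List.pyGet? discrete_color_scale
                  (PySem.Int.mod st.2 (discrete_color_scale.length : Int))).getD ""),
            st.2 + 1))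
    (PySem.Dict.empty, (0 : Int))).1.items

-- ===== PORT B =====
-- for i, s in enumerate(string_set): if string_set.index(s) == i:
--   result[s] = discrete_color_scale[len(set(string_set[:i])) % len(discrete_color_scale)]
def categorical_strings_to_colors_alt (string_set : List String) (discrete_color_scale : List String) : List (String × String) :=
  ((PySem.List.enumerate string_set).foldl
    (fun (result : PySem.Dict String String) p =>
      if (PySem.List.index? string_set p.2).map (fun n => (n : Int)) = some p.1 then
        result.insert p.2
          ((PySem.List.pyGet? discrete_color_scale
              (PySem.Int.mod
                ((PySem.Set.ofList (PySem.List.slice string_set none (some p.1))).length : Int)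
                (discrete_color_scale.length : Int))).getD "")
      else result)
    PySem.Dict.empty).items

-- ===== PRECONDITION & SPEC =====
-- Pre_ excludes only the inputs where A raises ZeroDivisionError: an empty palette with a non-empty string list.
def Pre_categorical_strings_to_colors (string_set : List String) (discrete_color_scale : List String) : Prop :=
  discrete_color_scale ≠ [] ∨ string_set = []
instance (string_set : List String) (discrete_color_scale : List String) : Decidable (Pre_categorical_strings_to_colors string_set discrete_color_scale) := by unfold Pre_categorical_strings_to_colors; infer_instance

def pvWitness_categorical_strings_to_colors : List String × List String :=
  (["a", "b", "a", "c"], ["red", "green"])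

def Spec_categorical_strings_to_colors (string_set : List String) (discrete_color_scale : List String) (out : List (String × String)) : Prop := out = categorical_strings_to_colors_alt string_set discrete_color_scale
instance (string_set : List String) (discrete_color_scale : List String) (out : List (String × String)) : Decidable (Spec_categorical_strings_to_colors string_set discrete_color_scale out) := by unfold Spec_categorical_strings_to_colors; infer_instance

-- ===== CLAIM (what is proved, stated in full; the proofs are below) =====
def Claim_equal_categorical_strings_to_colors : Prop := ∀ (string_set : List String) (discrete_color_scale : List String), Dom_categorical_strings_to_colors string_set discrete_color_scale → Pre_categorical_strings_to_colors string_set discrete_color_scale → Spec_categorical_strings_to_colors string_set discrete_color_scale (categorical_strings_to_colors string_set discrete_color_scale)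

-- ===== LEMMAS AND PROOFS =====

-- the color assigned to the i-th distinct string
def pvColor (dcs : List String) (i : Int) : String :=
  (PySem.List.pyGet? dcs (PySem.Int.mod i (dcs.length : Int))).getD ""

-- the dict either program has built once the distinct strings seen so far are exactly u (in order)
def pvDictOf (dcs : List String) (u : List String) : PySem.Dict String String :=
  PySem.Dict.mk ((PySem.List.enumerate u).map (fun p => (p.2, pvColor dcs p.1)))

lemma pvKeys_pvDictOf (dcs : List String) (u : List String) :
    (pvDictOf dcs u).keys = u := by
  simp [pvDictOf, PySem.Dict.keys_mk, List.map_map]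
  exact PySem.List.map_snd_enumerate u 0

lemma pvContains_pvDictOf (dcs : List String) (u : List String) (x : String) :
    (pvDictOf dcs u).contains x = decide (x ∈ u) := by
  rw [PySem.Dict.contains_eq_decide_mem_keys, pvKeys_pvDictOf]

lemma pvDictOf_snoc (dcs : List String) (u : List String) (x : String) (hx : x ∉ u) :
    (pvDictOf dcs u).insert x (pvColor dcs (u.length : Int)) = pvDictOf dcs (u ++ [x]) := by
  apply PySem.Dict.ext
  rw [PySem.Dict.items_insert_of_not_contains]
  · simp [pvDictOf, PySem.List.enumerate_append, PySem.List.enumerate]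
  · rw [pvContains_pvDictOf]; simp [hx]

-- A's loop invariant
lemma pvInvA (dcs : List String) :
    ∀ (l u : List String), u.Nodup →
      l.foldl
        (fun (st : PySem.Dict String String × Int) element =>
          if st.1.contains element then st
          else (st.1.insert element (pvColor dcs st.2), st.2 + 1))
        (pvDictOf dcs u, (u.length : Int))
      = (pvDictOf dcs (PySem.Set.update u l), ((PySem.Set.update u l).length : Int)) := by
  intro l
  induction l with
  | nil => intro u _; simp [PySem.Set.update]
  | cons x l ih =>
    intro u hu
    rw [List.foldl_cons, PySem.Set.update_cons]
    by_cases hx : x ∈ u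
    · rw [PySem.Set.add_of_mem hx]
      simpa [pvContains_pvDictOf, hx] using ih u hu
    · rw [PySem.Set.add_of_not_mem hx]
      have hnd : (u ++ [x]).Nodup :=
        List.Nodup.append hu (List.nodup_singleton x)
          (fun a ha hb => hx ((List.mem_singleton.mp hb) ▸ ha))
      have hstep :
          (if (pvDictOf dcs u).contains x then (pvDictOf dcs u, (u.length : Int))
           else ((pvDictOf dcs u).insert x (pvColor dcs (u.length : Int)), (u.length : Int) + 1))
          = (pvDictOf dcs (u ++ [x]), ((u ++ [x]).length : Int)) := by
        rw [pvContains_pvDictOf]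
        simp only [hx, decide_false, Bool.false_eq_true, if_false, Prod.mk.injEq]
        exact ⟨pvDictOf_snoc dcs u x hx, by simp⟩
      rw [hstep]
      exact ih (u ++ [x]) hnd

-- B's loop invariant: processing the suffix, with the prefix already decided
lemma pvInvB (dcs : List String) (full : List String) :
    ∀ (suf pre : List String), full = pre ++ suf →
      (PySem.List.enumerate suf (pre.length : Int)).foldl
        (fun (result : PySem.Dict String String) p =>
          if (PySem.List.index? full p.2).map (fun n => (n : Int)) = some p.1 then
            result.insert p.2
              (pvColor dcs
                ((PySem.Set.ofList (PySem.List.slice full none (some p.1))).length : Int))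
          else result)
        (pvDictOf dcs (PySem.Set.ofList pre))
      = pvDictOf dcs (PySem.Set.ofList full) := by
  intro suf
  induction suf with
  | nil => intro pre h; simp [PySem.List.enumerate, h]
  | cons x suf ih =>
    intro pre h
    rw [PySem.List.enumerate_cons, List.foldl_cons]
    have hslice : PySem.List.slice full none (some ((pre.length : Nat) : Int)) = pre := by
      rw [PySem.List.slice_to_natCast, h, List.take_left]
    have hofl : PySem.Set.ofList (pre ++ [x]) = PySem.Set.add (PySem.Set.ofList pre) x := by
      simp [PySem.Set.ofList, List.foldl_append]
    have hlen : ((pre ++ [x]).length : Int) = (pre.length : Int) + 1 := by simp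
    have happ : full = (pre ++ [x]) ++ suf := by simp [h]
    by_cases hx : x ∈ pre
    · -- not a first occurrence: index? full x points strictly before pre.length
      have hx' : x ∈ PySem.Set.ofList pre := (PySem.List.mem_dedup pre x).mpr hx
      have hidx : PySem.List.index? full x = PySem.List.index? pre x := by
        rw [h]; exact PySem.List.index?_append_of_mem _ hx
      obtain ⟨j, hj⟩ := Option.isSome_iff_exists.mp
        ((PySem.List.index?_isSome_iff pre x).mpr hx)
      have hjlt : j < pre.length := (PySem.List.getElem_of_index?_eq_some hj).1
      have hcond : ¬ ((PySem.List.index? full x).map (fun n => (n : Int)) = some (pre.length : Int)) := by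
        rw [hidx, hj]; simp; omega
      rw [if_neg hcond]
      have := ih (pre ++ [x]) happ
      rw [hofl, PySem.Set.add_of_mem hx'] at this
      simpa using this
    · -- first occurrence
      have hidx : PySem.List.index? full x = some pre.length := by
        rw [h, PySem.List.index?_eq_some_iff]
        exact ⟨pre, suf, rfl, rfl, hx⟩
      have hcond : (PySem.List.index? full x).map (fun n => (n : Int)) = some ((pre.length : Nat) : Int) := by
        rw [hidx]; simp
      rw [if_pos hcond, hslice]
      have hnx : x ∉ PySem.Set.ofList pre := fun hm => hx ((PySem.List.mem_dedup pre x).mp hm)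
      rw [pvDictOf_snoc dcs (PySem.Set.ofList pre) x hnx]
      have := ih (pre ++ [x]) happ
      rw [hofl, PySem.Set.add_of_not_mem hnx] at this
      simpa using this

-- ===== VERDICT (by name: the statement is the Claim_ definition above) =====
theorem categorical_strings_to_colors_spec : Claim_equal_categorical_strings_to_colors := by
  intro ss dcs _ _
  unfold Spec_categorical_strings_to_colors categorical_strings_to_colors categorical_strings_to_colors_alt
  have h0 : (PySem.Dict.empty : PySem.Dict String String) = pvDictOf dcs [] := by
    simp [pvDictOf, PySem.Dict.empty, PySem.List.enumerate]
  have hA := pvInvA dcs ss [] List.nodup_nil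
  have hB := pvInvB dcs ss ss [] (by simp)
  simp only [List.length_nil, Nat.cast_zero, PySem.Set.ofList_nil] at hA hB
  rw [h0]
  show (_ : PySem.Dict String String × Int).1.items = _
  rw [show (fun (st : PySem.Dict String String × Int) element =>
        if st.1.contains element then st
        else (st.1.insert element
                ((PySem.List.pyGet? dcs (PySem.Int.mod st.2 (dcs.length : Int))).getD ""),
              st.2 + 1))
      = (fun (st : PySem.Dict String String × Int) element =>
        if st.1.contains element then st
        else (st.1.insert element (pvColor dcs st.2), st.2 + 1)) from rfl]
  rw [hA]
  rw [show (fun (result : PySem.Dict String String) (p : Int × String) =>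
        if (PySem.List.index? ss p.2).map (fun n => (n : Int)) = some p.1 then
          result.insert p.2
            ((PySem.List.pyGet? dcs
                (PySem.Int.mod
                  ((PySem.Set.ofList (PySem.List.slice ss none (some p.1))).length : Int)
                  (dcs.length : Int))).getD "")
        else result)
      = (fun (result : PySem.Dict String String) (p : Int × String) =>
        if (PySem.List.index? ss p.2).map (fun n => (n : Int)) = some p.1 then
          result.insert p.2
            (pvColor dcs ((PySem.Set.ofList (PySem.List.slice ss none (some p.1))).length : Int))
        else result) from rfl]
  rw [hB]
  simp [PySem.Set.update_nil_left]
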